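-- pv_equiv track=rewrite | github.com/vaisakhjayan/5.-Vidura-Pro | Script Files/3.5 OpenAI 3 Large.py | _has_context_conflict
-- ===== SOURCE A (Python) =====
-- from typing import List, Dict, Tuple
--
-- def _has_context_conflict(segment_text: str, clip_data: Dict) -> bool:
--     """Check if there's a context conflict between segment and clip."""
--     segment_lower = segment_text.lower()
--     clip_name = clip_data.get('name', '').lower()
--
--     # Don't suggest funeral clips for wedding content
--     if 'funeral' in clip_name and any(word in segment_lower for word in ['wedding', 'married', 'vows', 'ceremony']):
--         return True
--
--     # Don't suggest wedding clips for funeral content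
--     if 'wedding' in clip_name and any(word in segment_lower for word in ['funeral', 'death', 'mourning']):
--         return True
--
--     # Don't suggest emotional/sad clips for positive content
--     if 'emotional' in clip_name and 'sad' in clip_name:
--         if any(word in segment_lower for word in ['inspire', 'powerful', 'successful', 'happy']):
--             return True
--
--     return False
-- ===== SOURCE B (Python) =====
-- _WORD_THEME = {
--     'wedding': 'W', 'married': 'W', 'vows': 'W', 'ceremony': 'W',
--     'funeral': 'F', 'death': 'F', 'mourning': 'F',
--     'inspire': 'P', 'powerful': 'P', 'successful': 'P', 'happy': 'P',
-- }
-- _CONFLICTS = {('FC', 'W'), ('WC', 'F'), ('EC', 'P')}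
--
-- def _has_context_conflict(segment_text: str, clip_data) -> bool:
--     """Classify the segment and the clip independently, then join on a conflict relation."""
--     seg = segment_text.lower()
--     name = clip_data.get('name', '').lower()
--     # stage 1: which themes does the segment mention?
--     themes = {t for w, t in _WORD_THEME.items() if w in seg}
--     # stage 2: which categories does the clip belong to?
--     cats = set()
--     if 'funeral' in name:
--         cats.add('FC')
--     if 'wedding' in name:
--         cats.add('WC')
--     if 'emotional' in name and 'sad' in name:
--         cats.add('EC')
--     # stage 3: relational join against the conflict relation
--     return any((c, t) in _CONFLICTS for c in cats for t in themes)
-- ===== Notes on version B (the rewrite author's own statement) =====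
-- stated objective: alternative
-- what changed: B works in three stages like a relational join: it classifies the segment into a theme set via a word-to-theme dictionary, classifies the clip into a category set, and then tests the cross product of the two sets against a conflict relation, instead of A's three sequential hard-coded if-branches.
import Mathlib
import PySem

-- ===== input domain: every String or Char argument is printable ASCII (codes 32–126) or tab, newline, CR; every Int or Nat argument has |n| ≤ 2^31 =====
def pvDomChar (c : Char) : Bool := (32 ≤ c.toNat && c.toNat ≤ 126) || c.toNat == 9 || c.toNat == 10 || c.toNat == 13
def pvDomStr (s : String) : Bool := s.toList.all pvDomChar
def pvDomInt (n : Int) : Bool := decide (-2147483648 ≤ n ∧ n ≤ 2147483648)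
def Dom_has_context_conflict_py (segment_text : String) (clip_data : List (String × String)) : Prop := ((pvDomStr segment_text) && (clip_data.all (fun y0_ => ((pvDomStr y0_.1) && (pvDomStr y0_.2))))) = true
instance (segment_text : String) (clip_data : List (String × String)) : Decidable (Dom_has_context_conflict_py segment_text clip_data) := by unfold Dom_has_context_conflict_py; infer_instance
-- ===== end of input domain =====

-- B classifies segment and clip independently (theme set / category set) and joins them against a conflict relation, instead of A's three sequential if-branches; objective: alternative decomposition, same cost.

-- ===== PORT A =====
def has_context_conflict_py (segment_text : String) (clip_data : List (String × String)) : Bool :=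
  let segment_lower := PySem.Str.lower segment_text
  let clip_name := PySem.Str.lower (PySem.Dict.getD (PySem.Dict.mk clip_data) "name" "")
  if PySem.Str.isIn "funeral" clip_name &&
      (["wedding", "married", "vows", "ceremony"].any (fun word => PySem.Str.isIn word segment_lower)) then
    true
  else if PySem.Str.isIn "wedding" clip_name &&
      (["funeral", "death", "mourning"].any (fun word => PySem.Str.isIn word segment_lower)) then
    true
  else if PySem.Str.isIn "emotional" clip_name && PySem.Str.isIn "sad" clip_name then
    if ["inspire", "powerful", "successful", "happy"].any (fun word => PySem.Str.isIn word segment_lower) then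
      true
    else
      false
  else
    false

-- ===== PORT B =====
def pvWordTheme : List (String × String) :=
  [("wedding", "W"), ("married", "W"), ("vows", "W"), ("ceremony", "W"),
   ("funeral", "F"), ("death", "F"), ("mourning", "F"),
   ("inspire", "P"), ("powerful", "P"), ("successful", "P"), ("happy", "P")]

def pvConflicts : PySem.Set (String × String) := PySem.Set.ofList [("FC", "W"), ("WC", "F"), ("EC", "P")]

def has_context_conflict_py_alt (segment_text : String) (clip_data : List (String × String)) : Bool :=
  let seg := PySem.Str.lower segment_text
  let name := PySem.Str.lower (PySem.Dict.getD (PySem.Dict.mk clip_data) "name" "")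
  -- stage 1: theme set of the segment ({t for w, t in _WORD_THEME.items() if w in seg})
  let themes : PySem.Set String :=
    PySem.Set.ofList ((pvWordTheme.filter (fun p => PySem.Str.isIn p.1 seg)).map (fun p => p.2))
  -- stage 2: category set of the clip
  let cats0 : PySem.Set String := PySem.Set.empty
  let cats1 := if PySem.Str.isIn "funeral" name then PySem.Set.add cats0 "FC" else cats0
  let cats2 := if PySem.Str.isIn "wedding" name then PySem.Set.add cats1 "WC" else cats1
  let cats3 := if PySem.Str.isIn "emotional" name && PySem.Str.isIn "sad" name then PySem.Set.add cats2 "EC" else cats2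
  -- stage 3: join against the conflict relation (any over the cross product)
  cats3.any (fun c => themes.any (fun t => PySem.Set.contains pvConflicts (c, t)))

-- ===== PRECONDITION & SPEC =====
def Spec_has_context_conflict_py (segment_text : String) (clip_data : List (String × String)) (out : Bool) : Prop := out = has_context_conflict_py_alt segment_text clip_data
instance (segment_text : String) (clip_data : List (String × String)) (out : Bool) : Decidable (Spec_has_context_conflict_py segment_text clip_data out) := by unfold Spec_has_context_conflict_py; infer_instance

-- ===== CLAIM =====
def Claim_equal_has_context_conflict_py : Prop := ∀ (segment_text : String) (clip_data : List (String × String)), Dom_has_context_conflict_py segment_text clip_data → Spec_has_context_conflict_py segment_text clip_data (has_context_conflict_py segment_text clip_data)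

-- ===== LEMMAS AND PROOFS =====
theorem pv_any_ofList {α : Type} [BEq α] [LawfulBEq α] (xs : List α) (p : α → Bool) :
    (PySem.Set.ofList xs).any p = xs.any p := by
  rw [Bool.eq_iff_iff]; simp [List.any_eq_true, PySem.Set.mem_ofList]

-- ===== VERDICT =====
theorem has_context_conflict_py_spec : Claim_equal_has_context_conflict_py := by
  intro segment_text clip_data _
  unfold Spec_has_context_conflict_py has_context_conflict_py has_context_conflict_py_alt pvWordTheme pvConflicts
  simp only [pv_any_ofList, List.any_map, List.any_filter, Function.comp]
  cases PySem.Str.isIn "funeral" (PySem.Str.lower (PySem.Dict.getD (PySem.Dict.mk clip_data) "name" "")) <;>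
  cases PySem.Str.isIn "wedding" (PySem.Str.lower (PySem.Dict.getD (PySem.Dict.mk clip_data) "name" "")) <;>
  cases PySem.Str.isIn "emotional" (PySem.Str.lower (PySem.Dict.getD (PySem.Dict.mk clip_data) "name" "")) <;>
  cases PySem.Str.isIn "sad" (PySem.Str.lower (PySem.Dict.getD (PySem.Dict.mk clip_data) "name" "")) <;>
    simp [PySem.Set.add, PySem.Set.empty, PySem.Set.ofList, List.any_cons]
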